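-- pv_equiv track=rewrite | github.com/Oyalmli/adventOfCode | 2020/day11/python/112v2.py | update
-- ===== SOURCE A (Python) =====
-- def update(grid,height,width):
--     newGrid = [x[:] for x in grid]
--     changed = False
--     for i in range(height):
--         for j in range(width):
--             if  grid[i][j] == '.':
--                 continue
--             neighbours = sum(map(
--                 lambda tup: check(j, i, grid, height, width, tup[0], tup[1]),
--                     [(0,1),(0,-1),(1,0),(-1,0),(1,1),(-1,1),(1,-1),(-1,-1)]))
--             if grid[i][j] == 'L':
--                 if neighbours == 0:
--                     changed = True
--                     newGrid[i][j] = '#'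
--             elif grid[i][j] == '#':
--                 if neighbours >= 5:
--                     changed = True
--                     newGrid[i][j] = 'L'
--
--     grid[:] = newGrid[:]
--     return grid, changed
--
-- def inside(x,y,height,width):
--     return 0 <= x <= (width-1) and 0 <=y <=(height-1)
--
-- def check(x,y,board, W, H, dx, dy):
--     posx=x+dx
--     posy=y+dy
--     while(inside(posx,posy,W,H)):
--         if board[posy][posx] == 'L':
--             return 0
--         if board[posy][posx] == '#':
--             return 1
--         posx+=dx
--         posy+=dy
--     return 0
-- ===== SOURCE B (Python) =====
-- def update(grid, height, width):
--     # Line-sweep: for each of the 4 line orientations, walk every maximal line of the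
--     # height x width rectangle once; two accumulator passes over the line (forward =
--     # nearest seat behind, backward = nearest seat ahead) count the occupied visible
--     # neighbours of every cell in amortized O(1), instead of an O(h+w) ray per cell.
--     occ = {}
--     for dy, dx in ((0, 1), (1, 0), (1, 1), (1, -1)):
--         for i0 in range(height):
--             for j0 in range(width):
--                 pi, pj = i0 - dy, j0 - dx
--                 if 0 <= pi < height and 0 <= pj < width:
--                     continue  # not the start of a maximal line
--                 line = []
--                 i, j = i0, j0
--                 while 0 <= i < height and 0 <= j < width:
--                     line.append((i, j))
--                     i += dy
--                     j += dx
--                 behind = None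
--                 for p in line:  # nearest seat behind ~ direction (-dy,-dx)
--                     if behind == '#':
--                         occ[p] = occ.get(p, 0) + 1
--                     c = grid[p[0]][p[1]]
--                     if c == 'L' or c == '#':
--                         behind = c
--                 ahead = None
--                 for p in reversed(line):  # nearest seat ahead ~ direction (dy,dx)
--                     if ahead == '#':
--                         occ[p] = occ.get(p, 0) + 1
--                     c = grid[p[0]][p[1]]
--                     if c == 'L' or c == '#':
--                         ahead = c
--     newGrid = [row[:] for row in grid]
--     changed = False
--     for i in range(height):
--         for j in range(width):
--             c = grid[i][j]
--             n = occ.get((i, j), 0)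
--             if c == 'L' and n == 0:
--                 newGrid[i][j] = '#'
--                 changed = True
--             elif c == '#' and n >= 5:
--                 newGrid[i][j] = 'L'
--                 changed = True
--     grid[:] = newGrid
--     return grid, changed
-- ===== Notes on version B (the rewrite author's own statement) =====
-- stated objective: alternative
-- what changed: B replaces A's per-cell 8-direction ray casting by a line sweep: for each of the 4 line orientations it walks every maximal line of the rectangle once and two accumulator passes over the line (forward = nearest seat behind, backward = nearest seat ahead) accumulate each cell's occupied-visible-neighbour count in a dict, so no cell ever casts a ray.
import Mathlib
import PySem

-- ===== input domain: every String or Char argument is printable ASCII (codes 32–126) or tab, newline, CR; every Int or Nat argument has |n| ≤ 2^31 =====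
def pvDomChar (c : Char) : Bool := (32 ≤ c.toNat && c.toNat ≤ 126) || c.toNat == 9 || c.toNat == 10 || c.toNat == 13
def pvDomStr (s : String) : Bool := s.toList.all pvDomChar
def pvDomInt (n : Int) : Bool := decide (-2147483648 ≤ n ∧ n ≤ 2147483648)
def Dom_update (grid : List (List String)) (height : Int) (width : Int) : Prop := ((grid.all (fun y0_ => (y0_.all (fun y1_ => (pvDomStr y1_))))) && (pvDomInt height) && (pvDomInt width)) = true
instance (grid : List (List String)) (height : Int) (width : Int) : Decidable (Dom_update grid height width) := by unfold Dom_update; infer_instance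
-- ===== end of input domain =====

-- B replaces A's per-cell 8-direction ray casting by a line sweep: it walks every maximal line of
-- the rectangle once per orientation and two accumulator passes per line count every cell's
-- occupied visible neighbours. Both Pythons also mutate `grid` in place identically
-- (grid[:] = newGrid); the equivalence proved is about the returned value.

-- ===== PORT A =====
-- shared indexing helper: board[y][x]; exact when in range (Pre_update), IndexError cases excluded
def cellAt (board : List (List String)) (y x : Int) : String :=
  PySem.List.pyGetD (PySem.List.pyGetD board y []) x ""

-- shared assignment helper: g[i][j] = v; exact when in range (Pre_update)
def setCell (g : List (List String)) (i j : Int) (v : String) : List (List String) :=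
  PySem.List.pySetD g i (PySem.List.pySetD (PySem.List.pyGetD g i []) j v)

def inside (x y height width : Int) : Bool :=
  decide (0 ≤ x ∧ x ≤ width - 1 ∧ 0 ≤ y ∧ y ≤ height - 1)

-- the while loop of `check`, with fuel (W.toNat + H.toNat + 2 steps always suffice for the
-- 8 unit directions it is called with: each step moves one unit until out of bounds)
def checkGo (board : List (List String)) (W H dx dy : Int) : Nat → Int → Int → Int
  | 0, _, _ => 0
  | n+1, posx, posy =>
    if inside posx posy W H then
      if cellAt board posy posx == "L" then 0
      else if cellAt board posy posx == "#" then 1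
      else checkGo board W H dx dy n (posx + dx) (posy + dy)
    else 0

def check (x y : Int) (board : List (List String)) (W H dx dy : Int) : Int :=
  checkGo board W H dx dy (W.toNat + H.toNat + 2) (x + dx) (y + dy)

def dirsA : List (Int × Int) := [(0,1),(0,-1),(1,0),(-1,0),(1,1),(-1,1),(1,-1),(-1,-1)]

def update (grid : List (List String)) (height : Int) (width : Int) : List (List String) × Bool :=
  let newGrid := grid.map (fun x => x)
  (PySem.List.pyRange 0 height 1).foldl (fun st i =>
    (PySem.List.pyRange 0 width 1).foldl (fun st j =>
      if cellAt grid i j == "." then st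
      else
        let neighbours : Int :=
          (dirsA.map (fun tup => check j i grid height width tup.1 tup.2)).sum
        if cellAt grid i j == "L" then
          if neighbours == 0 then (setCell st.1 i j "#", true) else st
        else if cellAt grid i j == "#" then
          if neighbours ≥ 5 then (setCell st.1 i j "L", true) else st
        else st) st) (newGrid, false)

-- ===== PORT B =====
-- 0 <= i < height and 0 <= j < width
def inRect (H W i j : Int) : Bool := decide (0 ≤ i ∧ i < H ∧ 0 ≤ j ∧ j < W)

-- the `while` collecting a maximal line, with fuel (each step moves i or j one unit toward the
-- boundary, so H.toNat + W.toNat + 2 steps always suffice for the 4 orientations used)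
def lineCells (H W dy dx : Int) : Nat → Int → Int → List (Int × Int)
  | 0, _, _ => []
  | n+1, i, j =>
    if inRect H W i j then (i, j) :: lineCells H W dy dx n (i + dy) (j + dx) else []

-- body of each accumulator pass: state = (occ counter, char of nearest seat seen so far)
def passStep (grid : List (List String)) (st : PySem.Dict (Int × Int) Int × Option String)
    (p : Int × Int) : PySem.Dict (Int × Int) Int × Option String :=
  let occ := if st.2 == some "#" then st.1.insert p (st.1.getD p 0 + 1) else st.1
  let c := cellAt grid p.1 p.2
  (occ, if c == "L" || c == "#" then some c else st.2)

-- one maximal line: forward pass (nearest seat behind), then backward pass (nearest seat ahead)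
def sweepLine (grid : List (List String)) (occ : PySem.Dict (Int × Int) Int)
    (line : List (Int × Int)) : PySem.Dict (Int × Int) Int :=
  let occ1 := (line.foldl (passStep grid) (occ, none)).1
  (line.reverse.foldl (passStep grid) (occ1, none)).1

-- the 4 line orientations, as (dy, dx)
def dirs4 : List (Int × Int) := [(0,1),(1,0),(1,1),(1,-1)]

def update_alt (grid : List (List String)) (height : Int) (width : Int) : List (List String) × Bool :=
  let occ := dirs4.foldl (fun occ d =>
    (PySem.List.pyRange 0 height 1).foldl (fun occ i0 =>
      (PySem.List.pyRange 0 width 1).foldl (fun occ j0 =>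
        if inRect height width (i0 - d.1) (j0 - d.2) then occ
        else sweepLine grid occ
          (lineCells height width d.1 d.2 (height.toNat + width.toNat + 2) i0 j0))
        occ) occ) PySem.Dict.empty
  let newGrid := grid.map (fun row => row)
  (PySem.List.pyRange 0 height 1).foldl (fun st i =>
    (PySem.List.pyRange 0 width 1).foldl (fun st j =>
      let c := cellAt grid i j
      let n := occ.getD (i, j) 0
      if c == "L" && n == 0 then (setCell st.1 i j "#", true)
      else if c == "#" && decide (n ≥ 5) then (setCell st.1 i j "L", true)
      else st) st) (newGrid, false)

-- ===== PRECONDITION & SPEC =====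
-- Pre_update: exactly the inputs on which the Python A returns (no IndexError): either the column
-- loop is empty, or the first `height` rows all exist and have at least `width` entries.
def Pre_update (grid : List (List String)) (height : Int) (width : Int) : Prop :=
  width ≤ 0 ∨ (height ≤ (grid.length : Int) ∧ ∀ row ∈ grid.take height.toNat, width ≤ (row.length : Int))
instance (grid : List (List String)) (height : Int) (width : Int) : Decidable (Pre_update grid height width) := by unfold Pre_update; infer_instance
def pvWitness_update : List (List String) × Int × Int := ([["L", "."], [".", "#"]], 2, 2)

def Spec_update (grid : List (List String)) (height : Int) (width : Int) (out : List (List String) × Bool) : Prop := out = update_alt grid height width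
instance (grid : List (List String)) (height : Int) (width : Int) (out : List (List String) × Bool) : Decidable (Spec_update grid height width out) := by unfold Spec_update; infer_instance

-- ===== CLAIM (what is proved, stated in full; the proofs are below) =====
def Claim_equal_update : Prop := ∀ (grid : List (List String)) (height : Int) (width : Int), Dom_update grid height width → Pre_update grid height width → Spec_update grid height width (update grid height width)

-- ===== LEMMAS AND PROOFS =====

-- proof-side helpers ----------------------------------------------------------

def seatB (grid : List (List String)) (p : Int × Int) : Bool :=
  cellAt grid p.1 p.2 == "L" || cellAt grid p.1 p.2 == "#"

-- char of the first seat on a list of cells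
def seatChar (grid : List (List String)) (l : List (Int × Int)) : Option String :=
  (l.find? (seatB grid)).map (fun p => cellAt grid p.1 p.2)

-- 0/1: is the first seat visible from p in direction (dy,dx) occupied?
def rayInd (grid : List (List String)) (H W dy dx : Int) (p : Int × Int) : Int :=
  if seatChar grid (lineCells H W dy dx (H.toNat + W.toNat + 2) (p.1 + dy) (p.2 + dx)) == some "#"
  then 1 else 0

def lastSeatAcc (grid : List (List String)) (acc : Option String) (l : List (Int × Int)) : Option String :=
  l.foldl (fun a p => if seatB grid p then some (cellAt grid p.1 p.2) else a) acc

-- cells bumped by one accumulator pass started with accumulator acc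
def fwdBumps (grid : List (List String)) : Option String → List (Int × Int) → List (Int × Int)
  | _, [] => []
  | acc, p :: rest =>
    (if acc == some "#" then [p] else []) ++
      fwdBumps grid (if seatB grid p then some (cellAt grid p.1 p.2) else acc) rest

-- number of remaining steps of a walk in direction (dy,dx)
def mu (H W dy dx i j : Int) : Nat :=
  if dy = 1 then (H - i).toNat else if dy = -1 then (i + 1).toNat
  else if dx = 1 then (W - j).toNat else (j + 1).toNat

-- walk backward to the start of p's maximal line
def startGo (H W dy dx : Int) : Nat → Int × Int → Int × Int
  | 0, p => p
  | n+1, p =>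
    if inRect H W (p.1 - dy) (p.2 - dx) then startGo H W dy dx n (p.1 - dy, p.2 - dx) else p

def startOf (H W dy dx : Int) (p : Int × Int) : Int × Int :=
  startGo H W dy dx (H.toNat + W.toNat + 2) p

def Dir8 (dy dx : Int) : Prop :=
  (dy, dx) ∈ ([(0,1),(0,-1),(1,0),(-1,0),(1,1),(1,-1),(-1,1),(-1,-1)] : List (Int × Int))

def Dir4 (dy dx : Int) : Prop := (dy, dx) ∈ dirs4

-- small facts ----------------------------------------------------------------

theorem dir4_dir8 {dy dx : Int} (h : Dir4 dy dx) : Dir8 dy dx := by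
  simp only [Dir4, dirs4, List.mem_cons, List.not_mem_nil, or_false] at h
  rcases h with h | h | h | h <;> simp only [Prod.mk.injEq] at h <;>
    obtain ⟨rfl, rfl⟩ := h <;> simp [Dir8]

theorem dir4_neg_dir8 {dy dx : Int} (h : Dir4 dy dx) : Dir8 (-dy) (-dx) := by
  simp only [Dir4, dirs4, List.mem_cons, List.not_mem_nil, or_false] at h
  rcases h with h | h | h | h <;> simp only [Prod.mk.injEq] at h <;>
    obtain ⟨rfl, rfl⟩ := h <;> simp [Dir8]

theorem mu_dec {H W dy dx i j : Int} (hd : Dir8 dy dx)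
    (h : inRect H W i j = true ∨ inRect H W (i + dy) (j + dx) = true) :
    mu H W dy dx (i + dy) (j + dx) < mu H W dy dx i j := by
  simp only [Dir8, List.mem_cons, List.not_mem_nil, or_false, Prod.mk.injEq] at hd
  simp only [inRect, decide_eq_true_eq] at h
  rcases hd with ⟨rfl,rfl⟩|⟨rfl,rfl⟩|⟨rfl,rfl⟩|⟨rfl,rfl⟩|⟨rfl,rfl⟩|⟨rfl,rfl⟩|⟨rfl,rfl⟩|⟨rfl,rfl⟩ <;>
    simp only [mu] <;> norm_num <;> omega

theorem mu_bound_rect {H W dy dx i j : Int} (hd : Dir8 dy dx) (h : inRect H W i j = true) :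
    mu H W dy dx i j < H.toNat + W.toNat + 1 := by
  simp only [Dir8, List.mem_cons, List.not_mem_nil, or_false, Prod.mk.injEq] at hd
  simp only [inRect, decide_eq_true_eq] at h
  rcases hd with ⟨rfl,rfl⟩|⟨rfl,rfl⟩|⟨rfl,rfl⟩|⟨rfl,rfl⟩|⟨rfl,rfl⟩|⟨rfl,rfl⟩|⟨rfl,rfl⟩|⟨rfl,rfl⟩ <;>
    simp only [mu] <;> norm_num <;> omega

theorem mu_bound_pred {H W dy dx i j : Int} (hd : Dir4 dy dx) (h : inRect H W i j = true) :
    mu H W (-dy) (-dx) (i - dy) (j - dx) < H.toNat + W.toNat + 1 := by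
  simp only [Dir4, dirs4, List.mem_cons, List.not_mem_nil, or_false, Prod.mk.injEq] at hd
  simp only [inRect, decide_eq_true_eq] at h
  rcases hd with ⟨rfl,rfl⟩|⟨rfl,rfl⟩|⟨rfl,rfl⟩|⟨rfl,rfl⟩ <;>
    simp only [mu] <;> norm_num <;> omega

theorem lineCells_out {H W dy dx i j : Int} (h : inRect H W i j = false) :
    ∀ n, lineCells H W dy dx n i j = [] := by
  intro n
  cases n with
  | zero => rfl
  | succ n => simp [lineCells, h]

theorem lineCells_fuel {H W dy dx : Int} (hd : Dir8 dy dx) :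
    ∀ n m i j, mu H W dy dx i j < n → mu H W dy dx i j < m →
      lineCells H W dy dx n i j = lineCells H W dy dx m i j := by
  intro n
  induction n with
  | zero => intro m i j hn _; exact absurd hn (Nat.not_lt_zero _)
  | succ n ih =>
    intro m i j hn hm
    obtain ⟨m', rfl⟩ : ∃ m', m = m' + 1 := ⟨m - 1, by omega⟩
    by_cases hr : inRect H W i j = true
    · simp only [lineCells, hr, if_true]
      have hdec := mu_dec (H := H) (W := W) hd (Or.inl hr)
      exact congrArg _ (ih m' (i + dy) (j + dx) (by omega) (by omega))
    · rw [lineCells_out (eq_false_of_ne_true hr), lineCells_out (eq_false_of_ne_true hr)]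

-- progression along a dirs4 line
theorem mem_lineCells_prog {H W dy dx : Int} (hd : Dir4 dy dx) :
    ∀ n i j p, p ∈ lineCells H W dy dx n i j → i ≤ p.1 ∧ (dy = 0 → i = p.1 ∧ j ≤ p.2) := by
  have hdy : (dy = 0 ∧ dx = 1) ∨ dy = 1 := by
    simp only [Dir4, dirs4, List.mem_cons, List.not_mem_nil, or_false, Prod.mk.injEq] at hd
    rcases hd with ⟨rfl,rfl⟩|⟨rfl,rfl⟩|⟨rfl,rfl⟩|⟨rfl,rfl⟩ <;> simp
  intro n
  induction n with
  | zero => intro i j p hp; simp [lineCells] at hp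
  | succ n ih =>
    intro i j p hp
    by_cases hr : inRect H W i j = true
    · simp only [lineCells, hr, if_true, List.mem_cons] at hp
      rcases hp with rfl | hp
      · exact ⟨le_refl _, fun _ => ⟨rfl, le_refl _⟩⟩
      · have := ih (i + dy) (j + dx) p hp
        rcases hdy with ⟨rfl, rfl⟩ | rfl
        · exact ⟨by omega, fun _ => by omega⟩
        · exact ⟨by omega, fun h => by omega⟩
    · rw [lineCells_out (eq_false_of_ne_true hr)] at hp; simp at hp

theorem head_notin_tail {H W dy dx : Int} (hd : Dir4 dy dx) (n : Nat) (i j : Int) :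
    (i, j) ∉ lineCells H W dy dx n (i + dy) (j + dx) := by
  intro hmem
  have h := mem_lineCells_prog hd n (i + dy) (j + dx) (i, j) hmem
  simp only [Dir4, dirs4, List.mem_cons, List.not_mem_nil, or_false, Prod.mk.injEq] at hd
  rcases hd with ⟨rfl,rfl⟩|⟨rfl,rfl⟩|⟨rfl,rfl⟩|⟨rfl,rfl⟩ <;> (simp at h; try omega)

theorem mem_fwdBumps_sub (grid : List (List String)) :
    ∀ (l : List (Int × Int)) acc p, p ∈ fwdBumps grid acc l → p ∈ l := by
  intro l
  induction l with
  | nil => intro acc p hp; simp [fwdBumps] at hp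
  | cons q l ih =>
    intro acc p hp
    simp only [fwdBumps, List.mem_append] at hp
    rcases hp with hp | hp
    · by_cases ha : acc == some "#" <;> simp [ha] at hp
      simp [hp]
    · exact List.mem_cons_of_mem _ (ih _ _ hp)

theorem fwdBumps_append (grid : List (List String)) :
    ∀ (xs ys : List (Int × Int)) acc,
      fwdBumps grid acc (xs ++ ys) = fwdBumps grid acc xs ++ fwdBumps grid (lastSeatAcc grid acc xs) ys := by
  intro xs
  induction xs with
  | nil => intro ys acc; simp [fwdBumps, lastSeatAcc]
  | cons q xs ih =>
    intro ys acc
    simp only [List.cons_append, fwdBumps, lastSeatAcc, List.foldl_cons, ih, List.append_assoc]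

theorem lastSeatAcc_reverse (grid : List (List String)) :
    ∀ (l : List (Int × Int)) acc, lastSeatAcc grid acc l.reverse =
      match l.find? (seatB grid) with
      | some p => some (cellAt grid p.1 p.2)
      | none => acc := by
  intro l
  induction l with
  | nil => intro acc; simp [lastSeatAcc]
  | cons q l ih =>
    intro acc
    have happ : ∀ (xs : List (Int × Int)) a, lastSeatAcc grid a (xs ++ [q]) =
        (if seatB grid q then some (cellAt grid q.1 q.2) else lastSeatAcc grid a xs) := by
      intro xs a; simp [lastSeatAcc, List.foldl_append]
    rw [List.reverse_cons, happ, ih]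
    by_cases hq : seatB grid q = true
    · simp only [List.find?_cons, hq, if_true]
    · simp only [List.find?_cons, hq, if_false, Bool.false_eq_true]

-- one pass = counter bumps
theorem pass_eq (grid : List (List String)) :
    ∀ (l : List (Int × Int)) occ acc,
      l.foldl (passStep grid) (occ, acc) =
        ((fwdBumps grid acc l).foldl (fun d x => d.insert x (d.getD x 0 + 1)) occ,
          lastSeatAcc grid acc l) := by
  intro l
  induction l with
  | nil => intro occ acc; simp [fwdBumps, lastSeatAcc]
  | cons p l ih =>
    intro occ acc
    have hstep : passStep grid (occ, acc) p =
        ((if acc == some "#" then occ.insert p (occ.getD p 0 + 1) else occ),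
          (if seatB grid p then some (cellAt grid p.1 p.2) else acc)) := rfl
    simp only [List.foldl_cons, fwdBumps, List.foldl_append, hstep, ih]
    by_cases ha : (acc == some "#") = true <;> simp [ha, lastSeatAcc]

theorem pass_getD (grid : List (List String)) (l : List (Int × Int))
    (occ : PySem.Dict (Int × Int) Int) (acc : Option String) (p : Int × Int) :
    ((l.foldl (passStep grid) (occ, acc)).1).getD p 0 =
      occ.getD p 0 + ((fwdBumps grid acc l).count p : Int) := by
  rw [pass_eq]
  exact PySem.Dict.getD_foldl_insert_add_one _ _ _

-- port A's ray = first seat of the corresponding cell list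
theorem checkGo_eq_seatChar (board : List (List String)) (hgt wid dx dy : Int) :
    ∀ n x y, checkGo board hgt wid dx dy n x y =
      if seatChar board (lineCells hgt wid dy dx n y x) == some "#" then 1 else 0 := by
  intro n
  induction n with
  | zero => intro x y; simp [checkGo, lineCells, seatChar]
  | succ n ih =>
    intro x y
    have hb : inside x y hgt wid = inRect hgt wid y x := by
      simp only [inside, inRect, decide_eq_decide]; omega
    simp only [checkGo, lineCells, hb]
    by_cases hr : inRect hgt wid y x = true
    · simp only [hr, if_true]
      by_cases hL : (cellAt board y x == "L") = true
      · have : seatB board (y, x) = true := by simp [seatB, cellAt]; left; simpa using hL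
        simp [seatChar, this, beq_iff_eq.mp hL]
      · by_cases hH : (cellAt board y x == "#") = true
        · have : seatB board (y, x) = true := by simp [seatB]; right; simpa using hH
          simp [seatChar, this, beq_iff_eq.mp hH]
        · have : seatB board (y, x) = false := by
            simp [seatB]; exact ⟨by simpa using hL, by simpa using hH⟩
          simp only [hL, hH, if_false, Bool.false_eq_true, ih]
          simp only [seatChar, List.find?_cons, this]
          rfl
    · simp [hr, seatChar]

-- forward pass counts: nearest seat behind = ray in direction (-dy,-dx)
theorem fwd_count (grid : List (List String)) (H W dy dx : Int) (hd : Dir4 dy dx) :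
    ∀ (n : Nat) (r q : Int × Int) (acc : Option String), mu H W dy dx r.1 r.2 < n → q ∈ lineCells H W dy dx n r.1 r.2 →
      acc = seatChar grid (lineCells H W (-dy) (-dx) (H.toNat + W.toNat + 2) (r.1 - dy) (r.2 - dx)) →
      ((fwdBumps grid acc (lineCells H W dy dx n r.1 r.2)).count q : Int) =
        rayInd grid H W (-dy) (-dx) q := by
  intro n
  induction n with
  | zero => intro r q acc hn _ _; exact absurd hn (Nat.not_lt_zero _)
  | succ n ih =>
    intro r q acc hn hq hacc
    by_cases hr : inRect H W r.1 r.2 = true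
    · rw [show lineCells H W dy dx (n+1) r.1 r.2 =
          (r.1, r.2) :: lineCells H W dy dx n (r.1 + dy) (r.2 + dx) by
        simp [lineCells, hr]] at hq ⊢
      have hacc' : (if seatB grid (r.1, r.2) then some (cellAt grid r.1 r.2) else acc) =
          seatChar grid (lineCells H W (-dy) (-dx) (H.toNat + W.toNat + 2)
            ((r.1 + dy) - dy) ((r.2 + dx) - dx)) := by
        rw [show (r.1 + dy) - dy = r.1 by ring_nf, show (r.2 + dx) - dx = r.2 by ring_nf]
        rw [show H.toNat + W.toNat + 2 = (H.toNat + W.toNat + 1) + 1 from rfl]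
        rw [show lineCells H W (-dy) (-dx) ((H.toNat + W.toNat + 1) + 1) r.1 r.2 =
            (r.1, r.2) :: lineCells H W (-dy) (-dx) (H.toNat + W.toNat + 1)
              (r.1 + -dy) (r.2 + -dx) by simp [lineCells, hr]]
        by_cases hs : seatB grid (r.1, r.2) = true
        · simp [seatChar, hs]
        · simp only [hs, if_false, Bool.false_eq_true, seatChar, List.find?_cons]
          rw [hacc]
          rw [show r.1 + -dy = r.1 - dy by ring_nf, show r.2 + -dx = r.2 - dx by ring_nf]
          rw [lineCells_fuel (dir4_neg_dir8 hd) (H.toNat + W.toNat + 2) (H.toNat + W.toNat + 1)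
            (r.1 - dy) (r.2 - dx) (by have := mu_bound_pred hd hr; omega)
            (mu_bound_pred hd hr)]
          rfl
      simp only [fwdBumps]
      by_cases hqr : q = (r.1, r.2)
      · have hnot : (r.1, r.2) ∉ lineCells H W dy dx n (r.1 + dy) (r.2 + dx) :=
          head_notin_tail hd n r.1 r.2
        have hcnt0 : (fwdBumps grid (if seatB grid (r.1, r.2) then
            some (cellAt grid r.1 r.2) else acc)
            (lineCells H W dy dx n (r.1 + dy) (r.2 + dx))).count (r.1, r.2) = 0 := by
          rw [List.count_eq_zero]
          intro hmem
          exact hnot (mem_fwdBumps_sub grid _ _ _ hmem)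
        rw [hqr, List.count_append]
        simp only [hcnt0, Nat.add_zero]
        rw [hacc]
        unfold rayInd
        rw [show (r.1, r.2).1 + -dy = r.1 - dy by simp; ring_nf,
          show (r.1, r.2).2 + -dx = r.2 - dx by simp; ring_nf]
        by_cases hch : (seatChar grid (lineCells H W (-dy) (-dx) (H.toNat + W.toNat + 2)
            (r.1 - dy) (r.2 - dx)) == some "#") = true
        · simp [hch]
        · simp [hch]
      · have hq' : q ∈ lineCells H W dy dx n (r.1 + dy) (r.2 + dx) := by
          rcases List.mem_cons.mp hq with h | h
          · exact absurd h hqr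
          · exact h
        rw [List.count_append]
        have hpre : (if (acc == some "#") = true then [(r.1, r.2)] else []).count q = 0 := by
          rw [List.count_eq_zero]
          intro hmem
          by_cases ha : (acc == some "#") = true <;> simp [ha] at hmem
          exact hqr hmem
        rw [hpre]
        have := ih (r.1 + dy, r.2 + dx) q
          (if seatB grid (r.1, r.2) then some (cellAt grid r.1 r.2) else acc)
          (show mu H W dy dx (r.1 + dy) (r.2 + dx) < n from
            by have := mu_dec (dir4_dir8 hd) (Or.inl hr); omega) hq' hacc'
        simpa using this
    · rw [lineCells_out (eq_false_of_ne_true hr)] at hq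
      simp at hq

-- backward pass counts: nearest seat ahead = ray in direction (dy,dx)
theorem bwd_count (grid : List (List String)) (H W dy dx : Int) (hd : Dir4 dy dx) :
    ∀ (n : Nat) (r q : Int × Int), mu H W dy dx r.1 r.2 < n → q ∈ lineCells H W dy dx n r.1 r.2 →
      ((fwdBumps grid none (lineCells H W dy dx n r.1 r.2).reverse).count q : Int) =
        rayInd grid H W dy dx q := by
  intro n
  induction n with
  | zero => intro r q hn _; exact absurd hn (Nat.not_lt_zero _)
  | succ n ih =>
    intro r q hn hq
    by_cases hr : inRect H W r.1 r.2 = true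
    · rw [show lineCells H W dy dx (n+1) r.1 r.2 =
          (r.1, r.2) :: lineCells H W dy dx n (r.1 + dy) (r.2 + dx) by
        simp [lineCells, hr]] at hq ⊢
      rw [List.reverse_cons, fwdBumps_append, List.count_append]
      have hlast : lastSeatAcc grid none (lineCells H W dy dx n (r.1 + dy) (r.2 + dx)).reverse =
          seatChar grid (lineCells H W dy dx n (r.1 + dy) (r.2 + dx)) := by
        rw [lastSeatAcc_reverse]
        unfold seatChar
        cases (lineCells H W dy dx n (r.1 + dy) (r.2 + dx)).find? (seatB grid) <;> simp
      by_cases hqr : q = (r.1, r.2)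
      · have hnot : (r.1, r.2) ∉ lineCells H W dy dx n (r.1 + dy) (r.2 + dx) :=
          head_notin_tail hd n r.1 r.2
        have hcnt0 : (fwdBumps grid none
            (lineCells H W dy dx n (r.1 + dy) (r.2 + dx)).reverse).count (r.1, r.2) = 0 := by
          rw [List.count_eq_zero]
          intro hmem
          exact hnot (List.mem_reverse.mp (mem_fwdBumps_sub grid _ _ _ hmem))
        rw [hqr, hcnt0, hlast]
        have hfuel : lineCells H W dy dx n (r.1 + dy) (r.2 + dx) =
            lineCells H W dy dx (H.toNat + W.toNat + 2) (r.1 + dy) (r.2 + dx) := by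
          have h1 := mu_dec (dir4_dir8 hd) (Or.inl hr)
          have h2 := mu_bound_rect (dir4_dir8 hd) hr
          exact lineCells_fuel (dir4_dir8 hd) n (H.toNat + W.toNat + 2) _ _ (by omega) (by omega)
        rw [hfuel]
        unfold rayInd fwdBumps
        by_cases hch : (seatChar grid (lineCells H W dy dx (H.toNat + W.toNat + 2)
            (r.1 + dy) (r.2 + dx)) == some "#") = true <;> simp [hch, fwdBumps]
      · have hq' : q ∈ lineCells H W dy dx n (r.1 + dy) (r.2 + dx) := by
          rcases List.mem_cons.mp hq with h | h
          · exact absurd h hqr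
          · exact h
        have hpost : (fwdBumps grid (lastSeatAcc grid none
            (lineCells H W dy dx n (r.1 + dy) (r.2 + dx)).reverse) [(r.1, r.2)]).count q = 0 := by
          rw [List.count_eq_zero]
          intro hmem
          have := mem_fwdBumps_sub grid _ _ _ hmem
          simp at this
          exact hqr this
        rw [hpost]
        have := ih (r.1 + dy, r.2 + dx) q
          (show mu H W dy dx (r.1 + dy) (r.2 + dx) < n from
            by have := mu_dec (dir4_dir8 hd) (Or.inl hr); omega) hq'
        simpa using this
    · rw [lineCells_out (eq_false_of_ne_true hr)] at hq
      simp at hq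

-- start of p's maximal line: well-defined and unique
theorem startGo_fuel {H W dy dx : Int} (hd : Dir4 dy dx) :
    ∀ n m (p : Int × Int), mu H W (-dy) (-dx) p.1 p.2 < n → mu H W (-dy) (-dx) p.1 p.2 < m →
      startGo H W dy dx n p = startGo H W dy dx m p := by
  intro n
  induction n with
  | zero => intro m p hn _; exact absurd hn (Nat.not_lt_zero _)
  | succ n ih =>
    intro m p hn hm
    obtain ⟨m', rfl⟩ : ∃ m', m = m' + 1 := ⟨m - 1, by omega⟩
    by_cases hb : inRect H W (p.1 - dy) (p.2 - dx) = true
    · simp only [startGo, hb, if_true]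
      have hdec : mu H W (-dy) (-dx) (p.1 + -dy) (p.2 + -dx) < mu H W (-dy) (-dx) p.1 p.2 := by
        refine mu_dec (dir4_neg_dir8 hd) (Or.inr ?_)
        rw [show p.1 + -dy = p.1 - dy by ring_nf, show p.2 + -dx = p.2 - dx by ring_nf]
        exact hb
      rw [show p.1 + -dy = p.1 - dy by ring_nf, show p.2 + -dx = p.2 - dx by ring_nf] at hdec
      exact ih m' (p.1 - dy, p.2 - dx) (by simpa using by omega) (by simpa using by omega)
    · simp only [startGo, hb, if_false, Bool.false_eq_true]

theorem mem_lineCells_self {H W dy dx i j : Int} (h : inRect H W i j = true) (n : Nat)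
    (hn : 0 < n) : (i, j) ∈ lineCells H W dy dx n i j := by
  obtain ⟨n', rfl⟩ : ∃ n', n = n' + 1 := ⟨n - 1, by omega⟩
  simp [lineCells, h]

theorem mem_lineCells_next {H W dy dx : Int} (hd : Dir8 dy dx) :
    ∀ n i j (q : Int × Int), q ∈ lineCells H W dy dx n i j → mu H W dy dx i j < n →
      inRect H W (q.1 + dy) (q.2 + dx) = true →
      (q.1 + dy, q.2 + dx) ∈ lineCells H W dy dx n i j := by
  intro n
  induction n with
  | zero => intro i j q hq _ _; simp [lineCells] at hq
  | succ n ih =>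
    intro i j q hq hn hnext
    by_cases hr : inRect H W i j = true
    · rw [show lineCells H W dy dx (n+1) i j =
          (i, j) :: lineCells H W dy dx n (i + dy) (j + dx) by simp [lineCells, hr]] at hq ⊢
      have hdec := mu_dec hd (Or.inl hr)
      rcases List.mem_cons.mp hq with rfl | hq'
      · exact List.mem_cons_of_mem _ (mem_lineCells_self hnext n (by omega))
      · exact List.mem_cons_of_mem _ (ih (i + dy) (j + dx) q hq' (by omega) hnext)
    · rw [lineCells_out (eq_false_of_ne_true hr)] at hq
      simp at hq

theorem startGo_spec (H W dy dx : Int) (hd : Dir4 dy dx) :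
    ∀ n (p : Int × Int), inRect H W p.1 p.2 = true → mu H W (-dy) (-dx) p.1 p.2 < n →
      inRect H W (startGo H W dy dx n p).1 (startGo H W dy dx n p).2 = true ∧
      inRect H W ((startGo H W dy dx n p).1 - dy) ((startGo H W dy dx n p).2 - dx) = false ∧
      p ∈ lineCells H W dy dx (H.toNat + W.toNat + 2)
        (startGo H W dy dx n p).1 (startGo H W dy dx n p).2 := by
  intro n
  induction n with
  | zero => intro p _ hn; exact absurd hn (Nat.not_lt_zero _)
  | succ n ih =>
    intro p hp hn
    by_cases hb : inRect H W (p.1 - dy) (p.2 - dx) = true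
    · simp only [startGo, hb, if_true]
      have hdec : mu H W (-dy) (-dx) (p.1 - dy) (p.2 - dx) < mu H W (-dy) (-dx) p.1 p.2 := by
        have := mu_dec (dir4_neg_dir8 hd) (Or.inr (by
          rw [show p.1 + -dy = p.1 - dy by ring_nf, show p.2 + -dx = p.2 - dx by ring_nf]
          exact hb))
        rw [show p.1 + -dy = p.1 - dy by ring_nf, show p.2 + -dx = p.2 - dx by ring_nf] at this
        exact this
      obtain ⟨h1, h2, h3⟩ := ih (p.1 - dy, p.2 - dx) hb (by simpa using by omega)
      refine ⟨h1, h2, ?_⟩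
      have := mem_lineCells_next (dir4_dir8 hd) (H.toNat + W.toNat + 2) _ _ _ h3
        (by
          have hmu := mu_bound_rect (dir4_dir8 hd) h1
          omega)
        (by simpa using hp)
      simpa using this
    · have hstop : startGo H W dy dx (n+1) p = p := by simp [startGo, hb]
      rw [hstop]
      exact ⟨hp, eq_false_of_ne_true hb, mem_lineCells_self hp _ (by omega)⟩

theorem startOf_walkback {H W dy dx : Int} (hd : Dir4 dy dx) :
    ∀ n i j (q : Int × Int), q ∈ lineCells H W dy dx n i j →
      startOf H W dy dx q = startOf H W dy dx (i, j) := by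
  intro n
  induction n with
  | zero => intro i j q hq; simp [lineCells] at hq
  | succ n ih =>
    intro i j q hq
    by_cases hr : inRect H W i j = true
    · rw [show lineCells H W dy dx (n+1) i j =
          (i, j) :: lineCells H W dy dx n (i + dy) (j + dx) by simp [lineCells, hr]] at hq
      rcases List.mem_cons.mp hq with rfl | hq'
      · rfl
      · rw [ih (i + dy) (j + dx) q hq']
        unfold startOf
        rw [show H.toNat + W.toNat + 2 = (H.toNat + W.toNat + 1) + 1 from rfl]
        rw [show startGo H W dy dx ((H.toNat + W.toNat + 1) + 1) (i + dy, j + dx) =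
            startGo H W dy dx (H.toNat + W.toNat + 1) (i, j) by
          simp only [startGo]
          rw [show (i + dy, j + dx).1 - dy = i by simp,
            show (i + dy, j + dx).2 - dx = j by simp]
          simp [hr]]
        exact startGo_fuel hd (H.toNat + W.toNat + 1) ((H.toNat + W.toNat + 1) + 1) (i, j)
          (by simpa using mu_bound_rect (dir4_neg_dir8 hd) (by simpa using hr))
          (by have := mu_bound_rect (dir4_neg_dir8 hd) (show inRect H W (i, j).1 (i, j).2 = true
                by simpa using hr); omega)
    · rw [lineCells_out (eq_false_of_ne_true hr)] at hq
      simp at hq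

theorem startOf_spec (H W dy dx : Int) (hd : Dir4 dy dx)
    (p : Int × Int) (hp : inRect H W p.1 p.2 = true) :
    inRect H W (startOf H W dy dx p).1 (startOf H W dy dx p).2 = true ∧
    inRect H W ((startOf H W dy dx p).1 - dy) ((startOf H W dy dx p).2 - dx) = false ∧
    p ∈ lineCells H W dy dx (H.toNat + W.toNat + 2) (startOf H W dy dx p).1 (startOf H W dy dx p).2 := by
  exact startGo_spec H W dy dx hd (H.toNat + W.toNat + 2) p hp
    (by have := mu_bound_rect (dir4_neg_dir8 hd) hp; omega)

theorem startOf_unique {H W dy dx : Int} (hd : Dir4 dy dx) (p : Int × Int) (i0 j0 : Int)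
    (hpred : inRect H W (i0 - dy) (j0 - dx) = false)
    (hmem : p ∈ lineCells H W dy dx (H.toNat + W.toNat + 2) i0 j0) :
    (i0, j0) = startOf H W dy dx p := by
  rw [startOf_walkback hd _ i0 j0 p hmem]
  unfold startOf
  rw [show H.toNat + W.toNat + 2 = (H.toNat + W.toNat + 1) + 1 from rfl]
  simp only [startGo]
  rw [show (i0, j0).1 - dy = i0 - dy from rfl, show (i0, j0).2 - dx = j0 - dx from rfl, hpred]
  simp

-- generic accounting over a fold
theorem getD_foldl_add {α : Type} (p : Int × Int) (l : List α)
    (g : PySem.Dict (Int × Int) Int → α → PySem.Dict (Int × Int) Int) (h : α → Int)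
    (hg : ∀ occ a, a ∈ l → (g occ a).getD p 0 = occ.getD p 0 + h a) :
    ∀ occ, (l.foldl g occ).getD p 0 = occ.getD p 0 + (l.map h).sum := by
  induction l with
  | nil => intro occ; simp
  | cons a l ih =>
    intro occ
    simp only [List.foldl_cons, List.map_cons, List.sum_cons]
    rw [ih (fun occ a ha => hg occ a (List.mem_cons_of_mem _ ha)) (g occ a),
      hg occ a List.mem_cons_self]
    ring

theorem nodup_pyRange (n : Int) : (PySem.List.pyRange 0 n 1).Nodup := by
  suffices h : ∀ (k : Nat) (a b : Int), (b - a).toNat ≤ k → (PySem.List.pyRange a b 1).Nodup by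
    exact h (n - 0).toNat 0 n le_rfl
  intro k
  induction k with
  | zero =>
    intro a b hk
    have : ¬ a < b := by omega
    rw [PySem.List.pyRange_one_eq_nil (by omega)]
    exact List.nodup_nil
  | succ k ih =>
    intro a b hk
    by_cases hab : a < b
    · rw [PySem.List.pyRange_one_cons hab]
      refine List.Nodup.cons ?_ (ih (a + 1) b (by omega))
      intro hmem
      rw [PySem.List.mem_pyRange_one] at hmem
      omega
    · rw [PySem.List.pyRange_one_eq_nil (by omega)]
      exact List.nodup_nil

theorem sum_map_ite {l : List Int} (c v : Int) (hn : l.Nodup) (hc : c ∈ l) :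
    (l.map (fun x => if x = c then v else 0)).sum = v := by
  induction l with
  | nil => simp at hc
  | cons a l ih =>
    simp only [List.map_cons, List.sum_cons]
    by_cases hac : a = c
    · subst hac
      have ha : a ∉ l := (List.nodup_cons.mp hn).1
      have hz : (l.map (fun x => if x = a then v else 0)).sum = 0 := by
        rw [List.sum_eq_zero]; intro x hx
        simp only [List.mem_map] at hx
        obtain ⟨y, hy, rfl⟩ := hx
        have hya : y ≠ a := fun h => ha (h ▸ hy)
        simp [hya]
      simp [hz]
    · have hc' : c ∈ l := by
        rcases List.mem_cons.mp hc with h | h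
        · exact absurd h.symm hac
        · exact h
      rw [ih (List.nodup_cons.mp hn).2 hc']
      simp [hac]

-- per orientation: the double loop adds exactly the two opposite rays at p
theorem orient_getD (grid : List (List String)) (H W dy dx : Int) (hd : Dir4 dy dx)
    (p : Int × Int) (hp : inRect H W p.1 p.2 = true) (occ : PySem.Dict (Int × Int) Int) :
    (((PySem.List.pyRange 0 H 1).foldl (fun occ i0 =>
        (PySem.List.pyRange 0 W 1).foldl (fun occ j0 =>
          if inRect H W (i0 - dy) (j0 - dx) then occ
          else sweepLine grid occ (lineCells H W dy dx (H.toNat + W.toNat + 2) i0 j0))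
          occ) occ)).getD p 0 =
      occ.getD p 0 + rayInd grid H W (-dy) (-dx) p + rayInd grid H W dy dx p := by
  obtain ⟨hs1, hs2, hs3⟩ := startOf_spec H W dy dx hd p hp
  set s := startOf H W dy dx p with hsdef
  set C := rayInd grid H W (-dy) (-dx) p + rayInd grid H W dy dx p with hC
  have hsweep : ∀ (occ' : PySem.Dict (Int × Int) Int) (i0 j0 : Int),
      (if inRect H W (i0 - dy) (j0 - dx) then occ'
       else sweepLine grid occ'
         (lineCells H W dy dx (H.toNat + W.toNat + 2) i0 j0)).getD p 0 =
      occ'.getD p 0 + (if (i0, j0) = s then C else 0) := by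
    intro occ' i0 j0
    by_cases hpred : inRect H W (i0 - dy) (j0 - dx) = true
    · rw [if_pos hpred]
      have hne : (i0, j0) ≠ s := by
        intro h
        rw [show i0 = s.1 from congrArg Prod.fst h, show j0 = s.2 from congrArg Prod.snd h] at hpred
        rw [hs2] at hpred
        exact Bool.false_ne_true hpred
      rw [if_neg hne, add_zero]
    · rw [if_neg (by simp [hpred])]
      unfold sweepLine
      rw [pass_getD, pass_getD]
      by_cases hmem : p ∈ lineCells H W dy dx (H.toNat + W.toNat + 2) i0 j0
      · have hij : inRect H W i0 j0 = true := by
          by_contra hij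
          rw [lineCells_out (eq_false_of_ne_true hij)] at hmem
          simp at hmem
        have heq : (i0, j0) = s := startOf_unique hd p i0 j0 (eq_false_of_ne_true hpred) hmem
        rw [if_pos heq, hC]
        have hmu : mu H W dy dx (i0, j0).1 (i0, j0).2 < H.toNat + W.toNat + 2 := by
          have := mu_bound_rect (dir4_dir8 hd) hij
          simpa using by omega
        have haccn : (none : Option String) = seatChar grid (lineCells H W (-dy) (-dx)
            (H.toNat + W.toNat + 2) ((i0, j0).1 - dy) ((i0, j0).2 - dx)) := by
          rw [show (i0, j0).1 - dy = i0 - dy from rfl, show (i0, j0).2 - dx = j0 - dx from rfl]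
          rw [lineCells_out (eq_false_of_ne_true hpred)]
          simp [seatChar]
        have hf := fwd_count grid H W dy dx hd (H.toNat + W.toNat + 2) (i0, j0) p none hmu
          (by simpa using hmem) haccn
        have hb := bwd_count grid H W dy dx hd (H.toNat + W.toNat + 2) (i0, j0) p hmu
          (by simpa using hmem)
        simp only at hf hb
        rw [hf, hb]
        ring
      · have hf0 : (fwdBumps grid none
            (lineCells H W dy dx (H.toNat + W.toNat + 2) i0 j0)).count p = 0 := by
          rw [List.count_eq_zero]
          exact fun hm => hmem (mem_fwdBumps_sub grid _ _ _ hm)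
        have hb0 : (fwdBumps grid none
            (lineCells H W dy dx (H.toNat + W.toNat + 2) i0 j0).reverse).count p = 0 := by
          rw [List.count_eq_zero]
          exact fun hm => hmem (List.mem_reverse.mp (mem_fwdBumps_sub grid _ _ _ hm))
        have hne : (i0, j0) ≠ s := by
          intro h
          refine hmem ?_
          rw [show i0 = s.1 from congrArg Prod.fst h, show j0 = s.2 from congrArg Prod.snd h]
          exact hs3
        rw [if_neg hne, hf0, hb0]
        simp
  have hinner : ∀ (occ' : PySem.Dict (Int × Int) Int) (i0 : Int),
      ((PySem.List.pyRange 0 W 1).foldl (fun occ j0 =>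
        if inRect H W (i0 - dy) (j0 - dx) then occ
        else sweepLine grid occ (lineCells H W dy dx (H.toNat + W.toNat + 2) i0 j0)) occ').getD p 0 =
      occ'.getD p 0 + (if i0 = s.1 then C else 0) := by
    intro occ' i0
    rw [getD_foldl_add p _ _ (fun j0 => if (i0, j0) = s then C else 0)
      (fun occ'' j0 _ => hsweep occ'' i0 j0)]
    congr 1
    by_cases hi0 : i0 = s.1
    · have hfun : (PySem.List.pyRange 0 W 1).map (fun j0 => if (i0, j0) = s then C else 0) =
          (PySem.List.pyRange 0 W 1).map (fun j0 => if j0 = s.2 then C else 0) := by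
        apply List.map_congr_left
        intro j0 _
        by_cases h : j0 = s.2
        · rw [if_pos (by rw [h, hi0]), if_pos h]
        · rw [if_neg (fun hh => h (congrArg Prod.snd hh)), if_neg h]
      rw [hfun, if_pos hi0]
      refine sum_map_ite s.2 C (nodup_pyRange W) ?_
      rw [PySem.List.mem_pyRange_one]
      simp only [inRect, decide_eq_true_eq] at hs1
      omega
    · rw [if_neg hi0, List.sum_eq_zero]
      intro x hx
      simp only [List.mem_map] at hx
      obtain ⟨j0, _, rfl⟩ := hx
      rw [if_neg (fun hh => hi0 (congrArg Prod.fst hh))]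
  rw [getD_foldl_add p _ _ (fun i0 => if i0 = s.1 then C else 0)
    (fun occ'' i0 _ => hinner occ'' i0)]
  have hsum : ((PySem.List.pyRange 0 H 1).map (fun i0 => if i0 = s.1 then C else 0)).sum = C := by
    refine sum_map_ite s.1 C (nodup_pyRange H) ?_
    rw [PySem.List.mem_pyRange_one]
    simp only [inRect, decide_eq_true_eq] at hs1
    omega
  rw [hsum, hC]
  ring

-- the whole occ table vs A's 8 rays
theorem occ_getD (grid : List (List String)) (H W : Int) (p : Int × Int)
    (hp : inRect H W p.1 p.2 = true) :
    ((dirs4.foldl (fun occ d =>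
      (PySem.List.pyRange 0 H 1).foldl (fun occ i0 =>
        (PySem.List.pyRange 0 W 1).foldl (fun occ j0 =>
          if inRect H W (i0 - d.1) (j0 - d.2) then occ
          else sweepLine grid occ (lineCells H W d.1 d.2 (H.toNat + W.toNat + 2) i0 j0))
          occ) occ) PySem.Dict.empty)).getD p 0 =
      (dirsA.map (fun tup => check p.2 p.1 grid H W tup.1 tup.2)).sum := by
  have hchk : ∀ dxx dyy : Int, check p.2 p.1 grid H W dxx dyy = rayInd grid H W dyy dxx p := by
    intro dxx dyy
    unfold check rayInd
    rw [checkGo_eq_seatChar]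
  have h1 := orient_getD grid H W 0 1 (by simp [Dir4, dirs4]) p hp
  have h2 := orient_getD grid H W 1 0 (by simp [Dir4, dirs4]) p hp
  have h3 := orient_getD grid H W 1 1 (by simp [Dir4, dirs4]) p hp
  have h4 := orient_getD grid H W 1 (-1) (by simp [Dir4, dirs4]) p hp
  simp only [dirsA, List.map_cons, List.map_nil, List.sum_cons, List.sum_nil, hchk]
  simp only [dirs4, List.foldl_cons, List.foldl_nil]
  rw [h4, h3, h2, h1]
  have h0 : (PySem.Dict.empty : PySem.Dict (Int × Int) Int).getD p 0 = 0 := by rfl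
  rw [h0]
  ring_nf

-- ===== VERDICT (by name: the statement is the Claim_ definition above) =====
theorem update_spec : Claim_equal_update := by
  intro grid height width _ _
  unfold Spec_update update update_alt
  apply PySem.List.foldl_congr_mem
  intro st i hi
  rw [PySem.List.mem_pyRange_one] at hi
  apply PySem.List.foldl_congr_mem
  intro st' j hj
  rw [PySem.List.mem_pyRange_one] at hj
  have hrect : inRect height width i j = true := by
    simp only [inRect, decide_eq_true_eq]
    exact ⟨hi.1, hi.2, hj.1, hj.2⟩
  have hocc := occ_getD grid height width (i, j) hrect
  simp only at hocc
  by_cases hdot : (cellAt grid i j == ".") = true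
  · have hceq := beq_iff_eq.mp hdot
    have hL : (cellAt grid i j == "L") = false := by simp [hceq]
    have hH : (cellAt grid i j == "#") = false := by simp [hceq]
    simp [hdot, hL, hH]
  · by_cases hL : (cellAt grid i j == "L") = true
    · have hH : (cellAt grid i j == "#") = false := by simp [beq_iff_eq.mp hL]
      simp only [hdot, Bool.false_eq_true, if_false, hL, if_true, hH, Bool.true_and,
        Bool.false_and, Bool.false_eq_true]
      rw [hocc]
    · by_cases hH : (cellAt grid i j == "#") = true
      · simp only [hdot, hL, hH, Bool.false_eq_true, if_false, if_true, Bool.true_and,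
          Bool.false_and]
        rw [hocc]
        by_cases h5 : (dirsA.map (fun tup => check j i grid height width tup.1 tup.2)).sum ≥ 5 <;>
          simp [h5]
      · simp [hdot, hL, hH]
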